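-- pv_equiv track=rewrite | github.com/yasminarshiya5-source/streamlit-application | app_dbscan.py | guess_lat_lon_columns
-- ===== SOURCE A (Python) =====
-- def guess_lat_lon_columns(columns):
--     """
--     Tries to guess latitude and longitude column names from CSV header.
--     Returns (lat_col, lon_col) or (None, None).
--     """
--     cols_lower = [c.lower().strip() for c in columns]
--     lat_candidates = ["lat", "latitude", "y"]
--     lon_candidates = ["lon", "lng", "long", "longitude", "x"]
--
--     lat_col = None
--     lon_col = None
--
--     for i, c in enumerate(cols_lower):
--         if c in lat_candidates:
--             lat_col = columns[i]
--         if c in lon_candidates: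
--             lon_col = columns[i]
--
--     return lat_col, lon_col
-- ===== SOURCE B (Python) =====
-- def guess_lat_lon_columns(columns):
--     """
--     Tries to guess latitude and longitude column names from CSV header.
--     Returns (lat_col, lon_col) or (None, None).
--     """
--     last = {}
--     for i, c in enumerate(columns):
--         last[c.lower().strip()] = i
--
--     def pick(candidates):
--         hits = [last[k] for k in candidates if k in last]
--         return columns[max(hits)] if hits else None
--
--     return pick(["lat", "latitude", "y"]), pick(["lon", "lng", "long", "longitude", "x"])
-- ===== Notes on version B (the rewrite author's own statement) =====
-- stated objective: alternative
-- what changed: Instead of A's column-driven scan that overwrites lat_col/lon_col on every match, B builds a dict mapping each lowered column name to its last index in one pass and then answers candidate-driven: for each candidate set it looks up the candidates in the dict and indexes the column with the maximal index.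
import Mathlib
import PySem

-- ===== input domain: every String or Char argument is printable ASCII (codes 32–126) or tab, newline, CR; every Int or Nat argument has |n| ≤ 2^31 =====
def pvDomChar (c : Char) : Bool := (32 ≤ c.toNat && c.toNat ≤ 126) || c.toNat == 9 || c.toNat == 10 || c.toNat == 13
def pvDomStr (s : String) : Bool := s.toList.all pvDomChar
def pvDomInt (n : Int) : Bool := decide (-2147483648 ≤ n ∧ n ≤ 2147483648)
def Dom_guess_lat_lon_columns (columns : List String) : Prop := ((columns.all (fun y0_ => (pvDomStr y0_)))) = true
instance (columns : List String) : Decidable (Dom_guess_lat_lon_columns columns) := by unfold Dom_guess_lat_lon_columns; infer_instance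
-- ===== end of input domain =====

-- B replaces A's column-driven overwrite loop by a last-index dictionary built once and a
-- candidate-driven lookup-and-max per candidate set; same result, a different algorithm.

-- ===== PORT A =====
def guess_lat_lon_columns (columns : List String) : Option String × Option String :=
  let cols_lower := columns.map (fun c => PySem.Str.strip (PySem.Str.lower c))
  let lat_candidates := ["lat", "latitude", "y"]
  let lon_candidates := ["lon", "lng", "long", "longitude", "x"]
  (PySem.List.enumerate cols_lower 0).foldl
    (fun (st : Option String × Option String) ic =>
      let st1 := if lat_candidates.contains ic.2 then (PySem.List.pyGet? columns ic.1, st.2) else st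
      if lon_candidates.contains ic.2 then (st1.1, PySem.List.pyGet? columns ic.1) else st1)
    (none, none)

-- ===== PORT B =====
-- helper of B: lowered/stripped name
def pvLow (c : String) : String := PySem.Str.strip (PySem.Str.lower c)

-- B's first pass: dict from lowered name to its LAST index (later inserts overwrite)
def pvBuildLast (columns : List String) : PySem.Dict String Int :=
  (PySem.List.enumerate columns 0).foldl (fun d p => d.insert (pvLow p.2) p.1) PySem.Dict.empty

-- B's pick: look the candidates up, take the column at the maximal index found
def pvPick (columns : List String) (last : PySem.Dict String Int) (candidates : List String) : Option String :=
  let hits := candidates.filterMap (fun k => last.get? k)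
  match PySem.List.max? hits (fun v => v) with
  | some j => PySem.List.pyGet? columns j
  | none => none

def guess_lat_lon_columns_alt (columns : List String) : Option String × Option String :=
  let last := pvBuildLast columns
  (pvPick columns last ["lat", "latitude", "y"],
   pvPick columns last ["lon", "lng", "long", "longitude", "x"])

-- ===== PRECONDITION & SPEC =====
def Spec_guess_lat_lon_columns (columns : List String) (out : Option String × Option String) : Prop := out = guess_lat_lon_columns_alt columns
instance (columns : List String) (out : Option String × Option String) : Decidable (Spec_guess_lat_lon_columns columns out) := by unfold Spec_guess_lat_lon_columns; infer_instance

-- ===== CLAIM (what is proved, stated in full; the proofs are below) =====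
def Claim_equal_guess_lat_lon_columns : Prop := ∀ (columns : List String), Dom_guess_lat_lon_columns columns → Spec_guess_lat_lon_columns columns (guess_lat_lon_columns columns)

-- ===== LEMMAS AND PROOFS =====

-- A's combined fold, abstracted over the two membership predicates on the lowered name.
def pvStepA (columns : List String) (p q : String → Bool)
    (st : Option String × Option String) (ic : Int × String) : Option String × Option String :=
  let st1 := if p ic.2 then (PySem.List.pyGet? columns ic.1, st.2) else st
  if q ic.2 then (st1.1, PySem.List.pyGet? columns ic.1) else st1

-- Fold over the (column, lowered) pairs, combined per-component update.
def pvStepB (p q : String → Bool)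
    (st : Option String × Option String) (x : String × String) : Option String × Option String :=
  ((if p x.2 then some x.1 else st.1), (if q x.2 then some x.1 else st.2))

-- the "last match wins" fold over columns, per candidate list
def pvFoldLast (cands : List String) (xs : List String) : Option String :=
  xs.foldl (fun a c => if cands.contains (pvLow c) then some c else a) none

lemma pvFoldA_eq_foldB (p q : String → Bool) (h : String → String) (full : List String) :
    ∀ (cols : List String) (s : Int) (init : Option String × Option String),
      (∀ k : Nat, (hk : k < cols.length) →
        PySem.List.pyGet? full (s + k) = some (cols[k])) →
      (PySem.List.enumerate (cols.map h) s).foldl (pvStepA full p q) init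
        = (cols.map (fun c => (c, h c))).foldl (pvStepB p q) init := by
  intro cols
  induction cols with
  | nil => intro s init _; simp
  | cons c t ih =>
    intro s init hidx
    have h0 : PySem.List.pyGet? full s = some c := by
      have := hidx 0 (by simp)
      simpa using this
    simp only [List.map_cons, PySem.List.enumerate_cons, List.foldl_cons]
    rw [ih (s + 1)]
    · congr 1
      simp [pvStepA, pvStepB, h0]
      split_ifs <;> simp
    · intro k hk
      have := hidx (k + 1) (by simpa using Nat.succ_lt_succ hk)
      have e : s + 1 + (k : Int) = s + ((k : Nat) + 1 : Nat) := by push_cast; ring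
      rw [e]
      simpa using this

-- the combined fold is the pair of the two component folds
lemma pvFoldB_split (p q : String → Bool) :
    ∀ (xs : List (String × String)) (init : Option String × Option String),
      xs.foldl (pvStepB p q) init
        = (xs.foldl (fun a x => if p x.2 then some x.1 else a) init.1,
           xs.foldl (fun a x => if q x.2 then some x.1 else a) init.2) := by
  intro xs
  induction xs with
  | nil => intro init; simp
  | cons x t ih => intro init; simp [List.foldl_cons, ih, pvStepB]

-- building the dict over one more column appends one overwrite
lemma pvBuild_concat (xs : List String) (c : String) :
    pvBuildLast (xs ++ [c]) = (pvBuildLast xs).insert (pvLow c) (xs.length : Int) := by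
  unfold pvBuildLast
  rw [PySem.List.enumerate_append]
  simp [PySem.List.enumerate_cons, PySem.List.enumerate_nil]

-- every stored index is a valid index of columns
lemma pvBuild_get?_bound (xs : List String) (k : String) (i : Int)
    (h : (pvBuildLast xs).get? k = some i) : 0 ≤ i ∧ i < (xs.length : Int) := by
  induction xs using List.reverseRecOn with
  | nil =>
    simp [pvBuildLast, PySem.List.enumerate_nil, PySem.Dict.get?_empty] at h
  | append_singleton xs c ih =>
    rw [pvBuild_concat, PySem.Dict.get?_insert] at h
    by_cases hk : k = pvLow c
    · simp [hk] at h
      simp only [List.length_append, List.length_singleton]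
      push_cast
      omega
    · simp [hk] at h
      have := ih h
      simp only [List.length_append, List.length_singleton]
      push_cast
      omega

-- pyGet? on a one-element extension agrees on valid prefix indices
lemma pvPyGet_append_left (xs : List String) (c : String) (i : Int)
    (h0 : 0 ≤ i) (h1 : i < (xs.length : Int)) :
    PySem.List.pyGet? (xs ++ [c]) i = PySem.List.pyGet? xs i := by
  have hn : i.toNat < xs.length := by omega
  rw [PySem.List.pyGet?_of_nonneg _ h0, PySem.List.pyGet?_of_nonneg _ h0]
  rw [List.getElem?_append_left hn]

-- MAIN: the candidate-driven pick over the last-index dict equals A's last-match fold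
lemma pvPick_eq_foldLast (cands : List String) :
    ∀ xs : List String, pvPick xs (pvBuildLast xs) cands = pvFoldLast cands xs := by
  intro xs
  induction xs using List.reverseRecOn with
  | nil =>
    have h0 : PySem.List.max? (cands.filterMap (fun k => (pvBuildLast []).get? k)) (fun v => v)
        = none := by
      rw [PySem.List.max?_eq_none_iff]
      simp [pvBuildLast, PySem.List.enumerate_nil, PySem.Dict.get?_empty]
    unfold pvPick pvFoldLast
    simp only []
    rw [h0]
    simp
  | append_singleton xs c ih =>
    have hR : pvFoldLast cands (xs ++ [c])
        = if cands.contains (pvLow c) then some c else pvFoldLast cands xs := by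
      simp [pvFoldLast, List.foldl_append]
    rw [hR]
    unfold pvPick
    rw [pvBuild_concat]
    by_cases hc : cands.contains (pvLow c) = true
    · -- the new column matches: its index xs.length is the new maximum
      set n : Int := (xs.length : Int) with hn
      set hits := cands.filterMap (fun k => ((pvBuildLast xs).insert (pvLow c) n).get? k) with hhits
      have hmem : n ∈ hits := by
        rw [hhits]
        refine List.mem_filterMap.2 ⟨pvLow c, by simpa using hc, ?_⟩
        simp
      have hle : ∀ y ∈ hits, y ≤ n := by
        intro y hy
        rw [hhits] at hy
        obtain ⟨k, _, hk⟩ := List.mem_filterMap.1 hy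
        rw [PySem.Dict.get?_insert] at hk
        by_cases hkc : k = pvLow c
        · simp [hkc] at hk; omega
        · simp [hkc] at hk
          have := pvBuild_get?_bound xs k y hk
          omega
      cases hmax : PySem.List.max? hits (fun v => v) with
      | none =>
        rw [PySem.List.max?_eq_none_iff] at hmax
        rw [hmax] at hmem
        simp at hmem
      | some m =>
        have h1 : m ≤ n := hle m (PySem.List.max?_mem hmax)
        have h2 : n ≤ m := PySem.List.max?_isMax hmax n hmem
        have hm : m = n := le_antisymm h1 h2
        subst hm
        simp only [hmax, hc, if_true]
        rw [hn]
        exact PySem.List.pyGet?_append_length xs [] c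
    · -- the new column matches no candidate: everything is as before
      have hne : ∀ k ∈ cands, k ≠ pvLow c := by
        intro k hk he
        exact hc (by simp [← he, hk])
      have hsame : cands.filterMap (fun k => ((pvBuildLast xs).insert (pvLow c) (xs.length : Int)).get? k)
          = cands.filterMap (fun k => (pvBuildLast xs).get? k) := by
        apply List.filterMap_congr
        intro k hk
        rw [PySem.Dict.get?_insert]
        simp [hne k hk]
      rw [hsame]
      simp only [hc]
      rw [← ih]
      unfold pvPick
      cases hmax : PySem.List.max? (cands.filterMap (fun k => (pvBuildLast xs).get? k)) (fun v => v) with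
      | none => simp [hmax]
      | some m =>
        simp only [hmax]
        have hmemm := PySem.List.max?_mem hmax
        obtain ⟨k, _, hk⟩ := List.mem_filterMap.1 hmemm
        have hb := pvBuild_get?_bound xs k m hk
        exact pvPyGet_append_left xs c m hb.1 hb.2

-- ===== VERDICT (by name: the statement is the Claim_ definition above) =====
theorem guess_lat_lon_columns_spec : Claim_equal_guess_lat_lon_columns := by
  intro columns _
  unfold Spec_guess_lat_lon_columns guess_lat_lon_columns guess_lat_lon_columns_alt
  simp only []
  have hA := pvFoldA_eq_foldB
    (fun c => ["lat", "latitude", "y"].contains c)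
    (fun c => ["lon", "lng", "long", "longitude", "x"].contains c)
    (fun c => PySem.Str.strip (PySem.Str.lower c)) columns columns 0 (none, none)
    (by
      intro k hk
      have : (0 : Int) + (k : Int) = (k : Int) := by ring
      rw [this, PySem.List.pyGet?_natCast]
      simp [hk])
  have hstep : (fun (st : Option String × Option String) (ic : Int × String) =>
      let st1 := if ["lat", "latitude", "y"].contains ic.2 then (PySem.List.pyGet? columns ic.1, st.2) else st
      if ["lon", "lng", "long", "longitude", "x"].contains ic.2 then (st1.1, PySem.List.pyGet? columns ic.1) else st1)
      = pvStepA columns (fun c => ["lat", "latitude", "y"].contains c)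
          (fun c => ["lon", "lng", "long", "longitude", "x"].contains c) := by
    funext st ic; simp [pvStepA]
  rw [hstep, hA, pvFoldB_split]
  rw [List.foldl_map, List.foldl_map]
  rw [pvPick_eq_foldLast, pvPick_eq_foldLast]
  simp [pvFoldLast, pvLow]
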